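-- pv_equiv track=rewrite | github.com/pedr0994/Python_hack_2 | hack_6.py | fn_hack_6
-- ===== SOURCE A (Python) =====
-- def fn_hack_6(s):
--     # Verificar si la lista está vacía
--     if not s:
--         return ["0"]
--     # Lista para almacenar el resultado transformado
--     result = []
--     # Recorrer cada índice de la lista de entrada
--     for i in range(len(s)):
--         # Si el índice es par, agregar el número secuencial como cadena
--         if i % 2 == 0:
--             result.append(str(i + 1))
--         # Si el índice es impar, agregar un guión
--         else:
--             result.append("-")
--
--     return result
-- ===== SOURCE B (Python) =====
-- def fn_hack_6(s):
--     # empty-list guard kept verbatim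
--     if not s:
--         return ["0"]
--     # fill everything with dashes, then patch the even positions in one stride
--     res = ["-"] * len(s)
--     res[::2] = [str(i + 1) for i in range(0, len(s), 2)]
--     return res
-- ===== Notes on version B (the rewrite author's own statement) =====
-- stated objective: idiomatic
-- what changed: Replaces the per-index branching loop with a fill-then-patch: the result starts as all dashes and the even positions are overwritten in one strided slice assignment.
import Mathlib
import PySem

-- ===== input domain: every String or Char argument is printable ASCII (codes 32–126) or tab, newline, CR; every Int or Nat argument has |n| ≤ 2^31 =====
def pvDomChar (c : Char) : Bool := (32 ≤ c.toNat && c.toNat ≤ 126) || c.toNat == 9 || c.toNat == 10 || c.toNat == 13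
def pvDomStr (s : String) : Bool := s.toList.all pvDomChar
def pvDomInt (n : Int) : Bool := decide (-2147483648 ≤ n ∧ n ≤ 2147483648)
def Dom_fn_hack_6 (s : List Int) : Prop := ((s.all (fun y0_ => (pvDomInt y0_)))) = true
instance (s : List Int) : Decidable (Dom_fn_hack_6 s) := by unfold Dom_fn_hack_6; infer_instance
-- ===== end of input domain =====

-- B rewrites A's branching index loop as fill-then-patch (all dashes, then overwrite even positions by a strided slice); objective: idiomatic, same cost.

-- ===== PORT A =====
def fn_hack_6 (s : List Int) : List String :=
  if s = [] then ["0"]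
  else
    (PySem.List.pyRange 0 (s.length : Int) 1).foldl
      (fun result i =>
        if PySem.Int.mod i 2 = 0 then result ++ [PySem.Int.toStr (i + 1)]
        else result ++ ["-"]) []

-- ===== PORT B =====
-- res[::2] = vs on a list whose even-stride length equals vs.length: replace
-- positions 0,2,4,… of res by the elements of vs (exact for B, where the lengths match).
def patchEven : List String → List String → List String
  | res, [] => res
  | [], _ :: _ => []
  | _ :: rest, v :: vs =>
    v :: (match rest with
          | [] => []
          | b :: rest' => b :: patchEven rest' vs)

def fn_hack_6_alt (s : List Int) : List String :=
  if s = [] then ["0"]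
  else
    patchEven (List.replicate s.length "-")
      ((PySem.List.pyRange 0 (s.length : Int) 2).map (fun i => PySem.Int.toStr (i + 1)))

-- ===== PRECONDITION & SPEC =====
def Spec_fn_hack_6 (s : List Int) (out : List String) : Prop := out = fn_hack_6_alt s
instance (s : List Int) (out : List String) : Decidable (Spec_fn_hack_6 s out) := by unfold Spec_fn_hack_6; infer_instance

-- ===== CLAIM (what is proved, stated in full; the proofs are below) =====
def Claim_equal_fn_hack_6 : Prop := ∀ (s : List Int), Dom_fn_hack_6 s → Spec_fn_hack_6 s (fn_hack_6 s)

-- ===== LEMMAS AND PROOFS =====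

-- closed form both sides are reduced to
def evenSpec (g : Nat → String) (n : Nat) : List String :=
  (List.range n).map (fun k => if k % 2 = 0 then g (k / 2) else "-")

theorem evenSpec_congr (g g' : Nat → String) (n : Nat) (h : ∀ k, g k = g' k) :
    evenSpec g n = evenSpec g' n := by
  unfold evenSpec
  apply List.map_congr_left
  intro k _
  rw [h]

theorem patchEven_replicate :
    ∀ (n : Nat) (g : Nat → String),
      patchEven (List.replicate n "-") ((List.range ((n + 1) / 2)).map g)
      = evenSpec g n := by
  intro n
  induction n using Nat.strong_induction_on with
  | _ n ih =>
    intro g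
    match n with
    | 0 => simp [patchEven, evenSpec]
    | 1 => simp [patchEven, evenSpec]
    | (m + 2) =>
      have hdiv : (m + 2 + 1) / 2 = (m + 1) / 2 + 1 := by omega
      rw [hdiv, List.range_succ_eq_map, List.map_cons, List.map_map]
      show patchEven ("-" :: "-" :: List.replicate m "-") _ = _
      rw [patchEven]
      have ihm := ih m (by omega) (fun k => g (k + 1))
      have hcomp : (List.range ((m + 1) / 2)).map (g ∘ Nat.succ)
          = (List.range ((m + 1) / 2)).map (fun k => g (k + 1)) := by
        simp [Function.comp]
      rw [hcomp, ihm]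
      simp only [evenSpec]
      have hrange : List.range (m + 2) = 0 :: 1 :: (List.range m).map (fun k => k + 2) := by
        rw [show m + 2 = (m + 1) + 1 from rfl, List.range_succ_eq_map,
          List.range_succ_eq_map, List.map_cons, List.map_map]
        rfl
      rw [hrange, List.map_cons, List.map_cons, List.map_map]
      simp only [Nat.zero_mod, Nat.zero_div]
      refine congrArg _ ?_
      refine congrArg₂ _ (by norm_num) ?_
      apply List.map_congr_left
      intro k _
      simp only [Function.comp]
      by_cases hk : k % 2 = 0
      · have h2 : (k + 2) % 2 = 0 := by omega
        have h3 : (k + 2) / 2 = k / 2 + 1 := by omega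
        simp [hk, h2, h3]
      · have h2 : ¬ (k + 2) % 2 = 0 := by omega
        simp [hk]

theorem fn_hack_6_eq_spec (s : List Int) (hs : s ≠ []) :
    fn_hack_6 s = evenSpec (fun k => PySem.Int.toStr (2 * (k : Int) + 1)) s.length := by
  have hn : 0 < s.length := List.length_pos_iff.mpr hs
  unfold fn_hack_6
  rw [if_neg hs]
  have hfun : (fun (result : List String) (i : Int) =>
      if PySem.Int.mod i 2 = 0 then result ++ [PySem.Int.toStr (i + 1)]
      else result ++ ["-"])
      = (fun (result : List String) (i : Int) =>
          result ++ [if PySem.Int.mod i 2 = 0 then PySem.Int.toStr (i + 1) else "-"]) := by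
    funext r i; split_ifs <;> rfl
  rw [hfun, PySem.List.foldl_append_singleton_eq_map, List.nil_append,
    PySem.List.pyRange_one, List.map_map]
  simp only [sub_zero, Int.toNat_natCast]
  apply List.map_congr_left
  intro k hk
  simp only [Function.comp, zero_add]
  have hmod : PySem.Int.mod (k : Int) 2 = ((k % 2 : Nat) : Int) := by
    exact_mod_cast PySem.Int.mod_natCast k 2
  rw [hmod]
  by_cases hpar : k % 2 = 0
  · have h1 : (2 * ((k / 2 : Nat) : Int) + 1) = ((k : Int) + 1) := by
      have : 2 * (k / 2) = k := by omega
      push_cast; omega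
    rw [hpar, if_pos rfl, Nat.cast_zero, if_pos rfl, ← h1]
  · have hne : ((k % 2 : Nat) : Int) ≠ 0 := by omega
    rw [if_neg hne, if_neg hpar]

theorem fn_hack_6_alt_eq_spec (s : List Int) (hs : s ≠ []) :
    fn_hack_6_alt s = evenSpec (fun k => PySem.Int.toStr (2 * (k : Int) + 1)) s.length := by
  have hn : 0 < s.length := List.length_pos_iff.mpr hs
  unfold fn_hack_6_alt
  rw [if_neg hs]
  rw [PySem.List.pyRange_of_pos 0 (s.length : Int) (by norm_num)]
  rw [if_pos (by exact_mod_cast hn)]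
  have hcnt : (((s.length : Int) - 0 + 2 - 1) / 2).toNat = (s.length + 1) / 2 := by
    omega
  rw [hcnt, List.map_map, patchEven_replicate]
  apply evenSpec_congr
  intro k
  simp only [Function.comp]
  ring_nf

-- ===== VERDICT (by name: the statement is the Claim_ definition above) =====
theorem fn_hack_6_spec : Claim_equal_fn_hack_6 := by
  intro s _
  unfold Spec_fn_hack_6
  by_cases hs : s = []
  · subst hs; rfl
  · rw [fn_hack_6_eq_spec s hs, fn_hack_6_alt_eq_spec s hs]
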